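-- pv_equiv track=rewrite | github.com/HiDoYa/advent-of-code | day20/main.py | image_padding
-- ===== SOURCE A (Python) =====
-- PADDING = 4
--
-- ALTERNATE = '.'
--
-- def image_padding(image):
--     lenx = len(image[0]) + PADDING*2
--     top_padding = ALTERNATE * lenx
--     left_padding = ALTERNATE * PADDING
--
--     new_image = []
--     for _ in range(PADDING):
--         new_image.append(top_padding)
--
--     for x in image:
--         new_image.append(left_padding + x + left_padding)
--
--     for _ in range(PADDING):
--         new_image.append(top_padding)
--
--     return new_image
-- ===== SOURCE B (Python) =====
-- PADDING = 4
--
-- ALTERNATE = '.'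
--
-- def image_padding(image):
--     # wrap a single one-pixel border PADDING times
--     cur = image
--     for _ in range(PADDING):
--         border = ALTERNATE * (len(cur[0]) + 2)
--         cur = [border] + [ALTERNATE + row + ALTERNATE for row in cur] + [border]
--     return cur
-- ===== Notes on version B (the rewrite author's own statement) =====
-- stated objective: alternative
-- what changed: B builds the padded image by iterating a single one-pixel border wrap PADDING times instead of precomputing full-width padding strings and appending the three blocks in one pass.
-- outside the precondition, e.g. on image_padding([]): A raises IndexError, B raises IndexError
import Mathlib
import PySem

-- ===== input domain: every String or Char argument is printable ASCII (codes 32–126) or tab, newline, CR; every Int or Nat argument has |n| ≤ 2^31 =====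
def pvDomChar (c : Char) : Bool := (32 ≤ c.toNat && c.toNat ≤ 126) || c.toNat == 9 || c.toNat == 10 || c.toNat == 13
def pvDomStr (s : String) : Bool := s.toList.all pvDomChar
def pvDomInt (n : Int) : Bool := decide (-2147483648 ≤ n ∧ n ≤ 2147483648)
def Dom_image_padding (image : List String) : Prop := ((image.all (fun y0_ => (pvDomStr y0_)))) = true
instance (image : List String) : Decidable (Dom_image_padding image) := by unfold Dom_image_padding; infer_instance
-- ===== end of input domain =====

-- B wraps a one-pixel '.' border PADDING(=4) times instead of A's one-pass three-block build; equivalent, no speed claim.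
-- Python str '+' / '*' are ported exactly on List Char via String.ofList/String.toList.

-- ===== PORT A =====
def image_padding (image : List String) : List String :=
  -- lenx = len(image[0]) + PADDING*2  (image[0] via pyGet?; Pre_ excludes the IndexError case image = [])
  let lenx := ((PySem.List.pyGet? image 0).getD "").toList.length + 4 * 2
  -- top_padding = ALTERNATE * lenx ; left_padding = ALTERNATE * PADDING
  let top : String := String.ofList (List.replicate lenx '.')
  let left : List Char := List.replicate 4 '.'
  let new1 := (List.range 4).foldl (fun acc _ => acc ++ [top]) ([] : List String)
  let new2 := image.foldl (fun acc x => acc ++ [String.ofList (left ++ x.toList ++ left)]) new1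
  (List.range 4).foldl (fun acc _ => acc ++ [top]) new2

-- ===== PORT B =====
-- helpers of Source B's loop body: ALTERNATE * m, and ALTERNATE + row + ALTERNATE
def dotsRow (m : Nat) : String := String.ofList (List.replicate m '.')
def padRow (r : String) : String := String.ofList ('.' :: r.toList ++ ['.'])

-- one pass of the loop body in Source B: border from the CURRENT first row, then [border] + ['.'+row+'.'] + [border]
def wrapOnce (cur : List String) : List String :=
  let border := dotsRow (((PySem.List.pyGet? cur 0).getD "").toList.length + 2)
  [border] ++ cur.map padRow ++ [border]

def image_padding_alt (image : List String) : List String :=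
  (List.range 4).foldl (fun c _ => wrapOnce c) image

-- ===== PRECONDITION & SPEC =====
-- Pre_ excludes only image = [], on which Python A raises IndexError at image[0] (B raises there too).
def Pre_image_padding (image : List String) : Prop := image ≠ []
instance (image : List String) : Decidable (Pre_image_padding image) := by unfold Pre_image_padding; infer_instance
def pvWitness_image_padding : List String := (["#.", "ab"])

def Spec_image_padding (image : List String) (out : List String) : Prop := out = image_padding_alt image
instance (image : List String) (out : List String) : Decidable (Spec_image_padding image out) := by unfold Spec_image_padding; infer_instance

-- ===== CLAIM (what is proved, stated in full; the proofs are below) =====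
def Claim_equal_image_padding : Prop := ∀ (image : List String), Dom_image_padding image → Pre_image_padding image → Spec_image_padding image (image_padding image)

-- ===== LEMMAS AND PROOFS =====

theorem length_dotsRow (m : Nat) : (dotsRow m).toList.length = m := by
  simp [dotsRow]

theorem wrap_cons (h : String) (t : List String) :
    wrapOnce (h :: t) =
      dotsRow (h.toList.length + 2) :: padRow h :: (t.map padRow ++ [dotsRow (h.toList.length + 2)]) := by
  simp [wrapOnce]

theorem rep_absorb (k : Nat) (l : List Char) :
    List.replicate k '.' ++ '.' :: l = List.replicate (k + 1) '.' ++ l := by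
  simp [List.replicate_succ']

theorem cons_rep (k : Nat) : '.' :: List.replicate k '.' = List.replicate (k + 1) '.' :=
  List.replicate_succ.symm

theorem image_padding_eq_alt (h : String) (t : List String) :
    image_padding (h :: t) = image_padding_alt (h :: t) := by
  have hb : image_padding_alt (h :: t) = wrapOnce (wrapOnce (wrapOnce (wrapOnce (h :: t)))) := by
    simp [image_padding_alt, List.range_succ]
  rw [hb, wrap_cons h t]
  rw [wrap_cons (dotsRow (h.toList.length + 2))]
  rw [length_dotsRow]
  rw [wrap_cons (dotsRow (h.toList.length + 2 + 2))]
  rw [length_dotsRow]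
  rw [wrap_cons (dotsRow (h.toList.length + 2 + 2 + 2))]
  rw [length_dotsRow]
  -- A side
  simp only [image_padding, List.range_succ, List.range_zero, List.foldl_append,
    List.foldl_cons, List.foldl_nil, PySem.List.foldl_append_singleton_eq_map,
    PySem.List.pyGet?_zero, List.getElem?_cons_zero, Option.getD_some]
  -- B side: push the maps through, collapse padRow on dots rows, normalize
  simp [List.map_append, Function.comp, padRow, dotsRow, rep_absorb,
    cons_rep, Nat.add_assoc]

-- ===== VERDICT (by name: the statement is the Claim_ definition above) =====
theorem image_padding_spec : Claim_equal_image_padding := by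
  intro image _ hpre
  unfold Spec_image_padding
  match image, hpre with
  | h :: t, _ => exact image_padding_eq_alt h t
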